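-- pv_equiv track=rewrite | github.com/miliar/Code_Jam_Webscraper | solutions_python/solutions_year16_round0_nr2/4120.py | maneuver
-- ===== SOURCE A (Python) =====
-- def maneuver(data):
--
--     neg_in = indexes(data, "-")
--     count = 0
--
--     if len(neg_in) == len(data):
--         count += 1
--         return count
--     else:
--         while len(data) > 1:
--             pos_in = indexes(data, "+")
--             if len(pos_in) != len(data):
--                 count += 1
--                 if data[len(data)-1] == '+':
--                     p = poslen(data)
--                     data = flip(data[:len(data)-p])
--                 else:
--                     data = flip(data)
--             else:
--                 return count
--
--         return count
--
-- def poslen(data):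
--     pos_count = 0
--     count = 0
--
--     while count < len(data):
--         if data[len(data)-1] == "+":
--             pos_count += 1
--             data = data[:len(data)-1]
--         else:
--             break
--
--     return pos_count
--
-- def indexes(data_, value):
--     return [i for i, val in enumerate(data_) if val == value]
--
-- def flip(faces):
--
--     p = "+"
--     n = "-"
--
--     pos_index = indexes(faces, "+")
--
--     if len(pos_index) != len(faces):
--         for i, j in enumerate(faces):
--             if j == p:
--                 faces[i] = n
--             else:
--                 faces[i] = p
--         return faces
-- ===== SOURCE B (Python) =====
-- def maneuver(data):
--     if all(x == "-" for x in data):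
--         return 1
--     if len(data) == 1:
--         return 0
--     changes = sum(1 for a, b in zip(data, data[1:]) if (a == "+") != (b == "+"))
--     return changes + (0 if data[-1] == "+" else 1)
-- ===== Notes on version B (the rewrite author's own statement) =====
-- stated objective: faster
-- what changed: A repeatedly flips and truncates the whole list (rebuilding index lists each round) until all faces are '+'; B is a single pass that counts adjacent pairs whose '+'-ness differs and adds 1 if the last face is not '+' (all-'-' and empty lists answer 1, a single non-'-' face answers 0).
import Mathlib
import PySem

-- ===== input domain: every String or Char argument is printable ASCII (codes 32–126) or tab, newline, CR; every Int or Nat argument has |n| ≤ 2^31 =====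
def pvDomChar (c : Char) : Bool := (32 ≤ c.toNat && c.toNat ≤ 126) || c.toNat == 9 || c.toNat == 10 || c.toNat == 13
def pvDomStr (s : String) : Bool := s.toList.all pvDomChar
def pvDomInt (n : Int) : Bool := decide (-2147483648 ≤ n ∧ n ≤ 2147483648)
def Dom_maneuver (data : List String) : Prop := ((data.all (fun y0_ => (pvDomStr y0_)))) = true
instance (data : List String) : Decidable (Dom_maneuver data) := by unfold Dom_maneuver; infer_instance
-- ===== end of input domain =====

-- B replaces A's quadratic repeated-flip simulation by a single pass counting adjacent sign changes
-- (plus 1 if the last face is not "+"); equivalence is about the RETURN value only — A mutates its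
-- argument list in place (via flip), B does not.

-- ===== PORT A =====

-- indexes(data_, value)
def indexesA (data_ : List String) (value : String) : List Int :=
  ((PySem.List.enumerate data_).filter (fun iv => iv.2 == value)).map (fun iv => iv.1)

theorem poslenLoopA_dec (data : List String)
    (_h2 : PySem.List.pyGet? data ((data.length : Int) - 1) = some "+") :
    (PySem.List.slice data none (some ((data.length : Int) - 1))).length < data.length := by
  have hne : data ≠ [] := by
    intro h; subst h; simp [PySem.List.pyGet?, PySem.List.pyIdx?] at _h2
  have hlen : 1 ≤ data.length := List.length_pos_of_ne_nil hne
  rw [PySem.List.slice_to data (by omega)]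
  simp only [List.length_take]
  omega

-- poslen's while-loop; the Python's `count` never changes, it is kept as a parameter.
-- data[len(data)-1] is PySem.List.pyGet?; the guard makes the access in-range.
def poslenLoopA (data : List String) (pos_count count : Int) : Int :=
  if _h1 : count < (data.length : Int) then
    if _h2 : PySem.List.pyGet? data ((data.length : Int) - 1) = some "+" then
      poslenLoopA (PySem.List.slice data none (some ((data.length : Int) - 1))) (pos_count + 1) count
    else pos_count
  else pos_count
termination_by data.length
decreasing_by exact poslenLoopA_dec data _h2

-- poslen(data)
def poslenA (data : List String) : Int := poslenLoopA data 0 0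

-- flip(faces): the in-place for-loop writes each position once, i.e. maps every element;
-- returns none exactly where the Python returns None (all faces "+").
def flipOneA (j : String) : String := if j == "+" then "-" else "+"

def flipA (faces : List String) : Option (List String) :=
  if (indexesA faces "+").length ≠ faces.length then
    some (faces.map flipOneA)
  else none

-- trailing-"+" count; used only to characterise poslenA / prove termination and the claim
def tcountA (l : List String) : Nat := (l.reverse.takeWhile (fun s => s == "+")).length

lemma pyGet?_last_eq (l : List String) :
    PySem.List.pyGet? l ((l.length : Int) - 1) = l.getLast? := by
  cases l with
  | nil => simp [PySem.List.pyGet?, PySem.List.pyIdx?]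
  | cons a t =>
    have h1 : (((a :: t).length : Int) - 1) = (((a :: t).length - 1 : Nat) : Int) := by
      simp only [List.length_cons]; push_cast; omega
    rw [h1, PySem.List.pyGet?_natCast, List.getLast?_eq_getElem?]

lemma tcountA_le (l : List String) : tcountA l ≤ l.length := by
  have := (List.takeWhile_sublist (l := l.reverse) (fun s : String => s == "+")).length_le
  simpa [tcountA] using this

lemma tcountA_dropLast (l : List String) (h : l.getLast? = some "+") :
    tcountA l = tcountA l.dropLast + 1 := by
  have hne : l ≠ [] := by intro h'; subst h'; simp at h
  have hsplit : l = l.dropLast ++ [l.getLast hne] := (List.dropLast_append_getLast hne).symm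
  have hlast : l.getLast hne = "+" := by
    have h2 := List.getLast?_eq_some_getLast hne
    rw [h2] at h; exact Option.some.inj h
  unfold tcountA
  conv_lhs => rw [hsplit]
  rw [List.reverse_append]
  simp [hlast]

lemma tcountA_pos (l : List String) (h : l.getLast? = some "+") : 1 ≤ tcountA l := by
  rw [tcountA_dropLast l h]; omega

lemma tcountA_zero (l : List String) (h : ¬ l.getLast? = some "+") : tcountA l = 0 := by
  unfold tcountA
  cases hr : l.reverse with
  | nil => simp
  | cons a t =>
    have ha : l.getLast? = some a := by
      rw [← List.head?_reverse, hr]; rfl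
    have hb : ¬ (a == "+") = true := by
      intro hb; exact h (by rw [ha, beq_iff_eq.mp hb])
    simp [hb]

lemma poslenLoopA_zero (n : Nat) : ∀ (l : List String), l.length ≤ n → ∀ pc : Int,
    poslenLoopA l pc 0 = pc + (tcountA l : Int) := by
  induction n with
  | zero =>
    intro l hl pc
    have h0 : l = [] := List.eq_nil_of_length_eq_zero (by omega)
    subst h0
    rw [poslenLoopA]
    simp [tcountA]
  | succ n ih =>
    intro l hl pc
    rw [poslenLoopA]
    split_ifs with h1 h2
    · have hlast : l.getLast? = some "+" := by rw [← pyGet?_last_eq]; exact h2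
      have hne : l ≠ [] := by intro h'; subst h'; simp at hlast
      have hlen : 1 ≤ l.length := List.length_pos_of_ne_nil hne
      have hsl : PySem.List.slice l none (some ((l.length : Int) - 1)) = l.dropLast := by
        rw [PySem.List.slice_to l (by omega), List.dropLast_eq_take]
        congr 1
        omega
      rw [hsl, ih l.dropLast (by simp [List.length_dropLast]; omega) (pc + 1),
        tcountA_dropLast l hlast]
      push_cast
      ring
    · rw [tcountA_zero l (by rw [← pyGet?_last_eq]; exact h2)]
      simp
    · have h0 : l = [] := by
        by_contra hne
        exact h1 (by have := List.length_pos_of_ne_nil hne; exact_mod_cast this)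
      subst h0
      simp [tcountA]

lemma poslenA_eq (l : List String) : poslenA l = (tcountA l : Int) := by
  have := poslenLoopA_zero l.length l (le_refl _) 0
  simpa [poslenA] using this

lemma flipA_getD_len_le (l : List String) : ((flipA l).getD []).length ≤ l.length := by
  unfold flipA
  split_ifs <;> simp

theorem maneuverLoopA_dec1 (data : List String)
    (_g2 : (indexesA data "+").length ≠ data.length)
    (_g3 : PySem.List.pyGet? data ((data.length : Int) - 1) = some "+") :
    2 * ((flipA (PySem.List.slice data none (some ((data.length : Int) - poslenA data)))).getD []).length
      + (if PySem.List.pyGet?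
            ((flipA (PySem.List.slice data none (some ((data.length : Int) - poslenA data)))).getD [])
            ((((flipA (PySem.List.slice data none (some ((data.length : Int) - poslenA data)))).getD []).length : Int) - 1)
            = some "+" then 0 else 1)
      < 2 * data.length
        + (if PySem.List.pyGet? data ((data.length : Int) - 1) = some "+" then 0 else 1) := by
    have hlast : data.getLast? = some "+" := by rw [← pyGet?_last_eq]; exact _g3
    have ht1 : 1 ≤ tcountA data := tcountA_pos data hlast
    have ht2 : tcountA data ≤ data.length := tcountA_le data
    have hc : ((data.length : Int) - poslenA data) = ((data.length - tcountA data : Nat) : Int) := by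
      rw [poslenA_eq]; push_cast [Nat.cast_sub ht2]; ring
    rw [hc, PySem.List.slice_to_natCast]
    have hle := flipA_getD_len_le (List.take (data.length - tcountA data) data)
    simp only [List.length_take] at hle
    simp only [if_pos _g3]
    split_ifs <;> omega

theorem maneuverLoopA_dec2 (data : List String)
    (_g1 : 1 < data.length)
    (_g2 : (indexesA data "+").length ≠ data.length)
    (_g3 : ¬ PySem.List.pyGet? data ((data.length : Int) - 1) = some "+") :
    2 * ((flipA data).getD []).length
      + (if PySem.List.pyGet? ((flipA data).getD [])
            ((((flipA data).getD []).length : Int) - 1) = some "+" then 0 else 1)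
      < 2 * data.length
        + (if PySem.List.pyGet? data ((data.length : Int) - 1) = some "+" then 0 else 1) := by
    have hne : data ≠ [] := by intro h; subst h; simp at _g1
    have hfl : flipA data = some (data.map flipOneA) := by rw [flipA, if_pos _g2]
    obtain ⟨x, hx⟩ : ∃ x, data.getLast? = some x := by
      cases h : data.getLast? with
      | none => exact absurd (List.getLast?_eq_none_iff.mp h) hne
      | some x => exact ⟨x, rfl⟩
    have hxne : ¬ x = "+" := by
      intro h; apply _g3; rw [pyGet?_last_eq, hx, h]
    have hnew : (data.map flipOneA).getLast? = some "+" := by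
      rw [List.getLast?_map, hx]
      simp [flipOneA, hxne]
    rw [hfl]
    simp only [Option.getD_some, pyGet?_last_eq]
    rw [hnew, hx]
    have h1 : ¬ ((some x : Option String) = some "+") := by simpa using hxne
    rw [if_pos rfl, if_neg h1]
    simp only [List.length_map]
    omega

-- the main while-loop of maneuver; count is the accumulator.
-- (flipA …).getD [] : the Python would crash on None here, but flip is only ever
-- called on a list that is not all "+", where it returns a list (proved in the claim's lemmas).
def maneuverLoopA (data : List String) (count : Int) : Int :=
  if _g1 : 1 < data.length then
    if _g2 : (indexesA data "+").length ≠ data.length then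
      if _g3 : PySem.List.pyGet? data ((data.length : Int) - 1) = some "+" then
        maneuverLoopA
          ((flipA (PySem.List.slice data none (some ((data.length : Int) - poslenA data)))).getD [])
          (count + 1)
      else
        maneuverLoopA ((flipA data).getD []) (count + 1)
    else count
  else count
termination_by 2 * data.length + (if PySem.List.pyGet? data ((data.length : Int) - 1) = some "+" then 0 else 1)
decreasing_by
  · exact maneuverLoopA_dec1 data _g2 _g3
  · exact maneuverLoopA_dec2 data _g1 _g2 _g3

-- maneuver(data)
def maneuver (data : List String) : Int :=
  let neg_in := indexesA data "-"
  if neg_in.length = data.length then (0 : Int) + 1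
  else maneuverLoopA data 0

-- ===== PORT B =====
-- single pass: count adjacent pairs whose "+"-ness differs; add 1 if the last face is not "+";
-- all-"-" (including the empty list) answers 1, a single face answers 0 unless all-"-".
def maneuver_alt (data : List String) : Int :=
  if data.all (fun x => x == "-") then 1
  else if data.length == 1 then 0
  else
    ((data.zip (PySem.List.slice data (some 1) none)).map
        (fun ab => if (ab.1 == "+") ≠ (ab.2 == "+") then (1 : Int) else 0)).sum
      + (if PySem.List.pyGet? data (-1) = some "+" then 0 else 1)

-- ===== PRECONDITION & SPEC =====
def Spec_maneuver (data : List String) (out : Int) : Prop := out = maneuver_alt data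
instance (data : List String) (out : Int) : Decidable (Spec_maneuver data out) := by unfold Spec_maneuver; infer_instance

-- ===== CLAIM (what is proved, stated in full; the proofs are below) =====
def Claim_equal_maneuver : Prop := ∀ (data : List String), Dom_maneuver data → Spec_maneuver data (maneuver data)

-- ===== LEMMAS AND PROOFS =====

-- number of adjacent positions whose "+"-ness differs
def chg : List String → Int
  | a :: b :: rest => (if (a == "+") ≠ (b == "+") then 1 else 0) + chg (b :: rest)
  | _ => 0

lemma indexesA_len_eq_iff (l : List String) (v : String) :
    (indexesA l v).length = l.length ↔ ∀ x ∈ l, x = v := by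
  unfold indexesA
  rw [List.length_map]
  constructor
  · intro h x hx
    have hsub : ((PySem.List.enumerate l).filter (fun iv => iv.2 == v)).Sublist
        (PySem.List.enumerate l) := List.filter_sublist
    have heq : (PySem.List.enumerate l).filter (fun iv => iv.2 == v)
        = PySem.List.enumerate l := hsub.eq_of_length (by rw [h, PySem.List.length_enumerate])
    have hall := List.filter_eq_self.mp heq
    obtain ⟨k, hk, hkx⟩ := List.getElem_of_mem hx
    have hmem : ((0 : Int) + k, l[k]) ∈ PySem.List.enumerate l :=
      (PySem.List.mem_enumerate_iff l 0 _).mpr ⟨k, hk, rfl⟩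
    have := hall _ hmem
    simp only [beq_iff_eq] at this
    rw [← hkx]; exact this
  · intro h
    have heq : (PySem.List.enumerate l).filter (fun iv => iv.2 == v)
        = PySem.List.enumerate l := by
      apply List.filter_eq_self.mpr
      intro p hp
      obtain ⟨k, hk, hpk⟩ := (PySem.List.mem_enumerate_iff l 0 p).mp hp
      subst hpk
      simp only [beq_iff_eq]
      exact h _ (List.getElem_mem hk)
    rw [heq, PySem.List.length_enumerate]

lemma chg_map_flip (l : List String) : chg (l.map flipOneA) = chg l := by
  induction l with
  | nil => rfl
  | cons a t ih =>
    cases t with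
    | nil => rfl
    | cons b t' =>
      show (if (flipOneA a == "+") ≠ (flipOneA b == "+") then (1:Int) else 0) + chg ((b :: t').map flipOneA)
          = (if (a == "+") ≠ (b == "+") then 1 else 0) + chg (b :: t')
      rw [ih]
      congr 1
      by_cases ha : a = "+" <;> by_cases hb : b = "+" <;> simp [flipOneA, ha, hb]

lemma chg_const (l : List String) (bv : Bool) (h : ∀ x ∈ l, (x == "+") = bv) : chg l = 0 := by
  induction l with
  | nil => rfl
  | cons a t ih =>
    cases t with
    | nil => rfl
    | cons b t' =>
      show (if (a == "+") ≠ (b == "+") then (1:Int) else 0) + chg (b :: t') = 0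
      rw [ih (fun x hx => h x (List.mem_cons_of_mem a hx))]
      have ha := h a (by simp)
      have hb := h b (by simp)
      rw [ha, hb]
      simp

lemma chg_append (xs : List String) : ∀ (ys : List String) (a b : String),
    xs.getLast? = some a → ys.head? = some b →
    chg (xs ++ ys) = chg xs + (if (a == "+") ≠ (b == "+") then 1 else 0) + chg ys := by
  induction xs with
  | nil => intro ys a b ha; simp at ha
  | cons a1 t ih =>
    intro ys a b ha hb
    cases t with
    | nil =>
      have e1 : a1 = a := by simpa using ha
      cases ys with
      | nil => simp at hb
      | cons y ys' =>
        have e2 : y = b := by simpa using hb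
        rw [e1, e2]
        show (if (a == "+") ≠ (b == "+") then (1:Int) else 0) + chg (b :: ys')
            = (0:Int) + (if (a == "+") ≠ (b == "+") then 1 else 0) + chg (b :: ys')
        ring
    | cons a2 t' =>
      have ha' : (a2 :: t').getLast? = some a := by
        rwa [List.getLast?_cons_cons] at ha
      have hstep : chg ((a1 :: a2 :: t') ++ ys)
          = (if (a1 == "+") ≠ (a2 == "+") then (1:Int) else 0) + chg ((a2 :: t') ++ ys) := rfl
      rw [hstep, ih ys a b ha' hb]
      show _ = (if (a1 == "+") ≠ (a2 == "+") then (1:Int) else 0) + chg (a2 :: t') + _ + _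
      ring

lemma chg_eq_zip_sum (data : List String) :
    ((data.zip data.tail).map
        (fun ab => if (ab.1 == "+") ≠ (ab.2 == "+") then (1 : Int) else 0)).sum = chg data := by
  induction data with
  | nil => rfl
  | cons a t ih =>
    cases t with
    | nil => rfl
    | cons b t' =>
      show (if (a == "+") ≠ (b == "+") then (1:Int) else 0)
          + (((b :: t').zip (b :: t').tail).map _).sum = _
      rw [ih]
      rfl

-- characterisation of A's while-loop: count + (adjacent changes + 1 if the last face is not "+"),
-- for any list that is either longer than 1 or ends in "+" (every recursive call does)
lemma maneuverLoopA_eq (n : Nat) : ∀ (data : List String),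
    2 * data.length + (if data.getLast? = some "+" then 0 else 1) ≤ n →
    (1 < data.length ∨ data.getLast? = some "+") → ∀ count : Int,
    maneuverLoopA data count
      = count + (if ∀ x ∈ data, x = "+" then 0
                 else chg data + (if data.getLast? = some "+" then 0 else 1)) := by
  induction n with
  | zero =>
    intro data hm hd count
    rcases hd with hd | hd
    · omega
    · have hne : data ≠ [] := by intro h; subst h; simp at hd
      have := List.length_pos_of_ne_nil hne
      omega
  | succ n ih =>
    intro data hm hd count
    rw [maneuverLoopA]
    by_cases g1 : 1 < data.length
    · rw [dif_pos g1]
      by_cases g2 : (indexesA data "+").length ≠ data.length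
      · rw [dif_pos g2]
        have hnotall : ¬ ∀ x ∈ data, x = "+" :=
          fun h => g2 ((indexesA_len_eq_iff data "+").mpr h)
        by_cases g3 : PySem.List.pyGet? data ((data.length : Int) - 1) = some "+"
        · rw [dif_pos g3]
          -- last is "+": strip the trailing "+" block, flip the rest
          have hlast : data.getLast? = some "+" := by rw [← pyGet?_last_eq]; exact g3
          have ht1 : 1 ≤ tcountA data := tcountA_pos data hlast
          have ht2 : tcountA data ≤ data.length := tcountA_le data
          set rt := data.reverse.takeWhile (fun s => s == "+") with hrt
          set rd := data.reverse.dropWhile (fun s => s == "+") with hrd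
          have hsplit : data = rd.reverse ++ rt.reverse := by
            have h1 : rt ++ rd = data.reverse := List.takeWhile_append_dropWhile
            calc data = data.reverse.reverse := (List.reverse_reverse _).symm
              _ = (rt ++ rd).reverse := by rw [h1]
              _ = rd.reverse ++ rt.reverse := List.reverse_append
          have htlen : rt.length = tcountA data := rfl
          have hlen : rd.length + rt.length = data.length := by
            have h2 := congrArg List.length hsplit
            simp at h2
            omega
          have hrdne : rd ≠ [] := by
            intro h
            apply hnotall
            intro x hx
            have hxr : x ∈ rt := by
              have h3 := hsplit
              rw [h] at h3
              simp at h3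
              rw [h3] at hx
              simpa using hx
            rw [hrt] at hxr
            have hpx := List.mem_takeWhile_imp (p := fun s : String => s == "+") hxr
            exact beq_iff_eq.mp hpx
          -- the sliced prefix is rd.reverse
          have hc : ((data.length : Int) - poslenA data) = ((rd.reverse.length : Nat) : Int) := by
            rw [poslenA_eq]
            simp only [List.length_reverse]
            omega
          have hpref : PySem.List.slice data none (some ((data.length : Int) - poslenA data))
              = rd.reverse := by
            rw [hc, PySem.List.slice_to_natCast]
            conv_lhs => rw [hsplit]
            exact List.take_left
          -- rd.reverse ends in a face that is not "+"
          have hha : rd.head? = some (rd.head hrdne) := List.head?_eq_some_head hrdne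
          have hpa : ((rd.head hrdne) == "+") = false := List.head_dropWhile_not _ hrdne
          have hane : ¬ (rd.head hrdne) = "+" := by simpa using hpa
          have hpreflast : rd.reverse.getLast? = some (rd.head hrdne) := by
            rw [List.getLast?_reverse]; exact hha
          -- the flip returns a value
          have hprefnotall : (indexesA rd.reverse "+").length ≠ rd.reverse.length := by
            intro h
            exact hane ((indexesA_len_eq_iff _ _).mp h _
              (by rw [List.mem_reverse]; exact List.head_mem hrdne))
          have hfl : flipA rd.reverse = some (rd.reverse.map flipOneA) := by
            rw [flipA, if_pos hprefnotall]
          have hd'last : (rd.reverse.map flipOneA).getLast? = some "+" := by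
            rw [List.getLast?_map, hpreflast]
            simp [flipOneA, hane]
          have hrec : maneuverLoopA (rd.reverse.map flipOneA) (count + 1)
              = (count + 1) + (if ∀ x ∈ rd.reverse.map flipOneA, x = "+" then 0
                               else chg (rd.reverse.map flipOneA)
                                 + (if (rd.reverse.map flipOneA).getLast? = some "+" then 0 else 1)) := by
            apply ih _ _ (Or.inr hd'last)
            rw [if_pos hlast] at hm
            rw [if_pos hd'last]
            simp only [List.length_map, List.length_reverse]
            omega
          rw [hpref, hfl]
          simp only [Option.getD_some]
          rw [hrec]
          -- arithmetic: chg data = chg rd.reverse + 1, chg of the flip = chg rd.reverse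
          have hrtrep : rt.reverse = List.replicate rt.length "+" := by
            have h4 : ∀ x ∈ rt.reverse, x = "+" := by
              intro x hx
              rw [List.mem_reverse, hrt] at hx
              have hpx := List.mem_takeWhile_imp (p := fun s : String => s == "+") hx
              exact beq_iff_eq.mp hpx
            have := List.eq_replicate_of_mem h4
            simpa using this
          have hrthead : rt.reverse.head? = some "+" := by
            rw [hrtrep]
            cases h : rt.length with
            | zero => omega
            | succ m => simp [List.replicate_succ]
          have hchg : chg data = chg rd.reverse + 1 := by
            conv_lhs => rw [hsplit]
            rw [chg_append rd.reverse rt.reverse _ "+" hpreflast hrthead]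
            have hz : chg rt.reverse = 0 := by
              apply chg_const _ true
              intro x hx
              rw [hrtrep] at hx
              have := List.eq_of_mem_replicate hx
              simp [this]
            rw [hz, hpa]
            simp
          have hchg' : chg (rd.reverse.map flipOneA) = chg rd.reverse := chg_map_flip rd.reverse
          rw [if_neg hnotall, if_pos hlast, if_pos hd'last, hchg, hchg']
          by_cases hall' : ∀ x ∈ rd.reverse.map flipOneA, x = "+"
          · have hzero : chg rd.reverse = 0 := by
              apply chg_const _ false
              intro x hx
              have hfx : flipOneA x = "+" := hall' _ (List.mem_map_of_mem hx)
              by_contra hb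
              simp only [Bool.not_eq_false, beq_iff_eq] at hb
              simp [flipOneA, hb] at hfx
            rw [if_pos hall', hzero]
            ring
          · rw [if_neg hall']
            ring
        · rw [dif_neg g3]
          -- last is not "+": flip everything
          have hne : data ≠ [] := by intro h; subst h; simp at g1
          obtain ⟨x, hx⟩ : ∃ x, data.getLast? = some x := by
            cases h : data.getLast? with
            | none => exact absurd (List.getLast?_eq_none_iff.mp h) hne
            | some x => exact ⟨x, rfl⟩
          have hxne : ¬ x = "+" := by
            intro h; apply g3; rw [pyGet?_last_eq, hx, h]
          have hfl : flipA data = some (data.map flipOneA) := by rw [flipA, if_pos g2]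
          have hd'last : (data.map flipOneA).getLast? = some "+" := by
            rw [List.getLast?_map, hx]
            simp [flipOneA, hxne]
          have hlastne : ¬ data.getLast? = some "+" := by rw [hx]; simpa using hxne
          have hrec : maneuverLoopA (data.map flipOneA) (count + 1)
              = (count + 1) + (if ∀ x ∈ data.map flipOneA, x = "+" then 0
                               else chg (data.map flipOneA)
                                 + (if (data.map flipOneA).getLast? = some "+" then 0 else 1)) := by
            apply ih _ _ (Or.inl (by simpa using g1))
            rw [if_neg hlastne] at hm
            rw [if_pos hd'last]
            simp only [List.length_map]
            omega
          rw [hfl]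
          simp only [Option.getD_some]
          rw [hrec]
          have hchg' : chg (data.map flipOneA) = chg data := chg_map_flip data
          rw [if_neg hnotall, if_neg hlastne, if_pos hd'last, hchg']
          by_cases hall' : ∀ x ∈ data.map flipOneA, x = "+"
          · have hzero : chg data = 0 := by
              apply chg_const _ false
              intro y hy
              have hfy : flipOneA y = "+" := hall' _ (List.mem_map_of_mem hy)
              by_contra hb
              simp only [Bool.not_eq_false, beq_iff_eq] at hb
              simp [flipOneA, hb] at hfy
            rw [if_pos hall', hzero]
            ring
          · rw [if_neg hall']
            ring
      · rw [dif_neg g2]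
        have hall : ∀ x ∈ data, x = "+" := (indexesA_len_eq_iff data "+").mp (not_not.mp g2)
        rw [if_pos hall]
        ring
    · rw [dif_neg g1]
      rcases hd with hd | hd
      · omega
      · cases data with
        | nil => simp at hd
        | cons a t =>
          cases t with
          | nil =>
            have ha : a = "+" := by simpa using hd
            rw [if_pos (by intro z hz; simp at hz; rw [hz, ha])]
            ring
          | cons b t' =>
            exact absurd (by simp) g1

-- ===== VERDICT (by name: the statement is the Claim_ definition above) =====
theorem maneuver_spec : Claim_equal_maneuver := by
  intro data _hdom
  unfold Spec_maneuver
  show maneuver data = maneuver_alt data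
  unfold maneuver maneuver_alt
  by_cases hneg : (indexesA data "-").length = data.length
  · have hall : data.all (fun x => x == "-") = true := by
      rw [List.all_eq_true]
      intro x hx
      exact beq_iff_eq.mpr ((indexesA_len_eq_iff data "-").mp hneg x hx)
    simp only [hneg, hall]
    simp
  · have hnall : ¬ data.all (fun x => x == "-") = true := by
      intro h
      apply hneg
      apply (indexesA_len_eq_iff data "-").mpr
      intro x hx
      exact beq_iff_eq.mp (List.all_eq_true.mp h x hx)
    have hne : data ≠ [] := by
      intro h; subst h; exact hneg rfl
    simp only [if_neg hneg, if_neg hnall]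
    match data, hne with
    | [y], _ =>
      rw [maneuverLoopA]
      simp
    | (y1 :: y2 :: t), _ =>
      set data := y1 :: y2 :: t with hdata
      have hnil : data ≠ [] := by simp [hdata]
      have hlen : 1 < data.length := by simp [hdata]
      have hA := maneuverLoopA_eq
        (2 * data.length + (if data.getLast? = some "+" then 0 else 1))
        data (le_refl _) (Or.inl hlen) 0
      rw [hA]
      have hlen1 : ¬ (data.length == 1) = true := by
        simp [hdata]
      rw [if_neg hlen1, PySem.List.slice_from_one, chg_eq_zip_sum, PySem.List.pyGet?_neg_one]
      by_cases hall : ∀ x ∈ data, x = "+"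
      · have hlast : data.getLast? = some "+" := by
          rw [List.getLast?_eq_some_getLast hnil]
          rw [hall _ (List.getLast_mem hnil)]
        have hzero : chg data = 0 := chg_const data true (fun x hx => beq_iff_eq.mpr (hall x hx))
        rw [if_pos hall, hzero, if_pos hlast]
      · rw [if_neg hall]
        ring
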